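-- pv_equiv track=rewrite | github.com/yann-zhong/GENOM_BIM | src/find_HC.py | binary_coding
-- ===== SOURCE A (Python) =====
-- def binarization(seq):
--     # list of contiguous strong hydrophobic amino acids
--     list_aa = ['V', 'I', 'L', 'F', 'M', 'Y', 'W', 'v', 'i', 'l', 'f', 'm', 'y', 'w']
--     for i in range(len(seq)):
--         if seq[i] in list_aa:
--             yield '1'
--         elif seq[i] in ['P', 'p']:
--             yield 'P'
--         else:
--             yield '0'
--
-- def find_x(seq, x):
--     for ind,nt in enumerate(seq):
--         if nt == x:
--             yield ind
--
-- def find_HCs(seq):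
--     pos_1 = list(find_x(seq, '1'))
--     pos_P = list(find_x(seq, 'P'))
--     imp_pos = sorted(pos_1+pos_P)
--     hc = []
--     for pos in imp_pos:
--         if pos not in pos_P and hc == []:
--             hc.append(pos)
--             continue
--         elif pos not in pos_P and pos-hc[-1]<5:
--             hc.append(pos)
--             continue
--         if len(hc)>1:
--             yield hc
--         if pos not in pos_P:
--             hc = [pos]
--         else:
--             hc = []
--     if len(hc)>1:
--         yield hc
--
-- def make_hc(positions):
--     for hc in positions:
--         yield ''.join(['1' if i in hc else '0' for i in range(hc[0], hc[-1]+1)])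
--
-- def keep_limits(positions):
--     for pos in positions:
--         yield pos[0]
--         yield pos[-1]
--
-- def put_back_ponctuation(positions, list_ponctuations):
--     for pos in positions:
--         for ponct in list_ponctuations:
--             if pos >= ponct:
--                 pos+=1
--             else:
--                 break
--         yield pos
--
-- def make_dict(positions, HCs):
--     final_dict = {}
--     for i in range(int(len(positions)/2)):
--         final_dict[(positions[i*2], positions[i*2+1])] = HCs[i]
--     return final_dict
--
-- def binary_coding(seq):
--     # remove "." and "-" from the sequence but save their position
--     list_ponctuations = [ind for ind,nucl in enumerate(seq) if nucl in ['.', '-']]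
--     seq = seq.replace('.', '').replace('-', '')
--     seq = ''.join(list(binarization(seq)))
--     all_positions = list(find_HCs(seq))
--     HCs = list(make_hc(all_positions))
--     positions = list(keep_limits(all_positions))
--     positions = list(put_back_ponctuation(positions, list_ponctuations))
--     return make_dict(positions, HCs)
-- ===== SOURCE B (Python) =====
-- def binary_coding(seq):
--     # One left-to-right scan over the punctuation-stripped sequence; no
--     # binarized string, no sort, no index lists: the current cluster is kept
--     # as a list of hydrophobic positions and closed on a proline or a gap >= 5.
--     puncts = [i for i, c in enumerate(seq) if c in '.-']
--     core = [c for c in seq if c not in '.-']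
--     strong = set('VILFMYWvilfmyw')
--     clusters = []
--     cur = []
--     for i, c in enumerate(core):
--         if c in strong:
--             if cur and i - cur[-1] >= 5:
--                 if len(cur) > 1:
--                     clusters.append(cur)
--                 cur = [i]
--             else:
--                 cur = cur + [i]
--         elif c in 'Pp':
--             if len(cur) > 1:
--                 clusters.append(cur)
--             cur = []
--     if len(cur) > 1:
--         clusters.append(cur)
--
--     def remap(p):
--         for q in puncts:
--             if p >= q:
--                 p += 1
--             else:
--                 break
--         return p
--
--     out = {}
--     for cl in clusters:
--         members = set(cl)
--         hc = ''.join('1' if j in members else '0' for j in range(cl[0], cl[-1] + 1))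
--         out[(remap(cl[0]), remap(cl[-1]))] = hc
--     return out
-- ===== Notes on version B (the rewrite author's own statement) =====
-- stated objective: alternative
-- what changed: Replaced the binarize/find_x/sort/find_HCs multi-pass generator pipeline with a single left-to-right scan over the punctuation-stripped residues that maintains the current cluster directly and builds the result dict per cluster, with no intermediate binary string, index lists or sort.
import Mathlib
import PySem

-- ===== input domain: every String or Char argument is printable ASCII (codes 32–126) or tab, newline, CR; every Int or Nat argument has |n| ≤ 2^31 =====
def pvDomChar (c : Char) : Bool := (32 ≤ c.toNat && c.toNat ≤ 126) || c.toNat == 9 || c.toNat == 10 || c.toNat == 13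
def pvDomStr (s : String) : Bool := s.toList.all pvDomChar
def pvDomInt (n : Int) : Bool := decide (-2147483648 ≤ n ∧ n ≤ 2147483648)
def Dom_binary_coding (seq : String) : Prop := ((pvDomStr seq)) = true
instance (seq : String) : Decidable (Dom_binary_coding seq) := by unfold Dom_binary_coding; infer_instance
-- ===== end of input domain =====

-- B replaces A's binarize → find_x ×2 → sort → find_HCs pipeline by one left-to-right scan over the
-- punctuation-stripped residues that maintains the current cluster directly (objective: alternative).

-- shared helper: the identical 'for ponct in …: if pos >= ponct: pos += 1 else: break' loop
-- appears verbatim in both Pythons (put_back_ponctuation in A, remap in B)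
def pvPutBack : List Int → Int → Int
  | [], pos => pos
  | q :: qs, pos => if pos ≥ q then pvPutBack qs (pos + 1) else pos

-- ===== PORT A =====
def pvListAA : List Char := ['V','I','L','F','M','Y','W','v','i','l','f','m','y','w']

def pvBinChar (c : Char) : Char :=
  if c ∈ pvListAA then '1' else if c ∈ ['P','p'] then 'P' else '0'

def pvBinarization (s : List Char) : List Char := s.map pvBinChar

-- find_x: generator of the indices whose character equals x
def pvFindX (s : List Char) (x : Char) : List Int :=
  (PySem.List.enumerate s).filterMap (fun p => if p.2 = x then some p.1 else none)

-- one iteration of the find_HCs loop; hc[-1] is read only when hc ≠ [] (the pyGetD default is never used)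
def pvHCStep (posP : List Int) (st : List (List Int) × List Int) (pos : Int) :
    List (List Int) × List Int :=
  if pos ∉ posP ∧ st.2 = [] then (st.1, st.2 ++ [pos])
  else if pos ∉ posP ∧ pos - PySem.List.pyGetD st.2 (-1) 0 < 5 then (st.1, st.2 ++ [pos])
  else
    let out := if st.2.length > 1 then st.1 ++ [st.2] else st.1
    if pos ∉ posP then (out, [pos]) else (out, [])

def pvFindHCs (s : List Char) : List (List Int) :=
  let posP := pvFindX s 'P'
  let imp := PySem.List.sorted (pvFindX s '1' ++ posP) (fun x => x) false
  let r := imp.foldl (pvHCStep posP) ([], [])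
  if r.2.length > 1 then r.1 ++ [r.2] else r.1

-- make_hc: hc[0], hc[-1] are read on clusters of length > 1 (defaults never used)
def pvMakeHC (hc : List Int) : List Char :=
  (PySem.List.pyRange (PySem.List.pyGetD hc 0 0) (PySem.List.pyGetD hc (-1) 0 + 1) 1).map
    (fun i => if i ∈ hc then '1' else '0')

-- make_dict: int(len(positions)/2) = len(positions) // 2 (the length is a small nonnegative int: exact)
def pvMakeDict (positions : List Int) (HCs : List String) : PySem.Dict (Int × Int) String :=
  (PySem.List.pyRange 0 (PySem.Int.floordiv (PySem.List.len positions) 2) 1).foldl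
    (fun d i =>
      d.insert (PySem.List.pyGetD positions (i * 2) 0, PySem.List.pyGetD positions (i * 2 + 1) 0)
        (PySem.List.pyGetD HCs i ""))
    PySem.Dict.empty

def binary_coding (seq : String) : List (Int × Int × String) :=
  let lp := (PySem.List.enumerate seq.toList).filterMap
      (fun p => if p.2 ∈ ['.', '-'] then some p.1 else none)
  let stripped := PySem.Chars.replace (PySem.Chars.replace seq.toList ['.'] []) ['-'] []
  let b := pvBinarization stripped
  let allpos := pvFindHCs b
  let HCs := allpos.map (fun hc => String.ofList (pvMakeHC hc))
  let positions := allpos.flatMap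
      (fun pos => [PySem.List.pyGetD pos 0 0, PySem.List.pyGetD pos (-1) 0])
  let positions := positions.map (pvPutBack lp)
  -- the returned dict[(int,int), str] flattened to the required triple type, in insertion order
  (pvMakeDict positions HCs).items.map (fun p => (p.1.1, p.1.2, p.2))

-- ===== PORT B =====
def pvStrong : PySem.Set Char :=
  PySem.Set.ofList ['V','I','L','F','M','Y','W','v','i','l','f','m','y','w']

-- one step of B's single scan; cur[-1] is read only when cur ≠ []
def pvScanStep (st : List (List Int) × List Int) (p : Int × Char) :
    List (List Int) × List Int :=
  if PySem.Set.contains pvStrong p.2 then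
    if st.2 ≠ [] ∧ p.1 - PySem.List.pyGetD st.2 (-1) 0 ≥ 5 then
      ((if st.2.length > 1 then st.1 ++ [st.2] else st.1), [p.1])
    else (st.1, st.2 ++ [p.1])
  else if p.2 = 'P' ∨ p.2 = 'p' then
    ((if st.2.length > 1 then st.1 ++ [st.2] else st.1), [])
  else st

def binary_coding_alt (seq : String) : List (Int × Int × String) :=
  let puncts := (PySem.List.enumerate seq.toList).filterMap
      (fun p => if p.2 = '.' ∨ p.2 = '-' then some p.1 else none)  -- `c in '.-'` on a single char
  let core := seq.toList.filter (fun c => ¬(c = '.' ∨ c = '-'))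
  let st := (PySem.List.enumerate core).foldl pvScanStep ([], [])
  let clusters := if st.2.length > 1 then st.1 ++ [st.2] else st.1
  let d := clusters.foldl
      (fun d cl =>
        let members := PySem.Set.ofList cl
        let hc := String.ofList
            ((PySem.List.pyRange (PySem.List.pyGetD cl 0 0) (PySem.List.pyGetD cl (-1) 0 + 1) 1).map
              (fun j => if PySem.Set.contains members j then '1' else '0'))
        d.insert (pvPutBack puncts (PySem.List.pyGetD cl 0 0),
                  pvPutBack puncts (PySem.List.pyGetD cl (-1) 0)) hc)
      PySem.Dict.empty
  d.items.map (fun p => (p.1.1, p.1.2, p.2))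

-- ===== PRECONDITION & SPEC =====
def Spec_binary_coding (seq : String) (out : List (Int × Int × String)) : Prop := out = binary_coding_alt seq
instance (seq : String) (out : List (Int × Int × String)) : Decidable (Spec_binary_coding seq out) := by unfold Spec_binary_coding; infer_instance

-- ===== CLAIM (what is proved, stated in full; the proofs are below) =====
def Claim_equal_binary_coding : Prop := ∀ (seq : String), Dom_binary_coding seq → Spec_binary_coding seq (binary_coding seq)

-- ===== LEMMAS AND PROOFS =====

theorem pv_replace_go (x : Char) : ∀ (fuel : Nat) (l : List Char) (acc : List Char), l.length ≤ fuel →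
    PySem.Chars.replace.go [x] [] fuel l acc = acc.reverse ++ l.filter (fun c => c ≠ x) := by
  intro fuel
  induction fuel with
  | zero =>
    intro l acc h
    cases l with
    | nil => simp [PySem.Chars.replace.go]
    | cons c t => simp at h
  | succ fuel ih =>
    intro l acc h
    cases l with
    | nil => simp [PySem.Chars.replace.go]
    | cons c t =>
      by_cases hc : c = x
      · subst hc
        rw [PySem.Chars.replace.go]
        simp only [List.isPrefixOf, BEq.rfl, Bool.and_true, if_true]
        simp only [List.length_cons, List.length_nil, List.drop_succ_cons, List.drop_zero,
          List.reverse_nil, List.nil_append]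
        rw [ih t acc (by simpa using h)]
        simp
      · rw [PySem.Chars.replace.go]
        have hpre : ([x].isPrefixOf (c :: t)) = false := by
          simp [List.isPrefixOf]; exact fun h' => hc h'.symm
        rw [hpre]
        simp only [Bool.false_eq_true, if_false]
        rw [ih t (c :: acc) (by simpa using h)]
        simp [hc]

theorem pv_replace_single (x : Char) (cs : List Char) :
    PySem.Chars.replace cs [x] [] = cs.filter (fun c => c ≠ x) := by
  rw [PySem.Chars.replace]
  simp only [List.isEmpty_cons, if_false, Bool.false_eq_true]
  simpa using pv_replace_go x cs.length cs [] le_rfl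

theorem pv_strip (cs : List Char) :
    PySem.Chars.replace (PySem.Chars.replace cs ['.'] []) ['-'] [] =
      cs.filter (fun c => ¬(c = '.' ∨ c = '-')) := by
  rw [pv_replace_single, pv_replace_single, List.filter_filter]
  refine List.filter_congr ?_
  intro c _
  by_cases h1 : c = '.' <;> by_cases h2 : c = '-' <;> simp [h1, h2]

theorem pv_enumerate_map (f : Char → Char) (l : List Char) (s : Int) :
    PySem.List.enumerate (l.map f) s = (PySem.List.enumerate l s).map (fun p => (p.1, f p.2)) := by
  induction l generalizing s with
  | nil => simp [PySem.List.enumerate_nil]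
  | cons c t ih => simp [PySem.List.enumerate_cons, ih]

theorem pv_aa_not_p {c : Char} (h : c ∈ pvListAA) : ¬(c = 'P' ∨ c = 'p') := by
  simp [pvListAA] at h
  rcases h with rfl|rfl|rfl|rfl|rfl|rfl|rfl|rfl|rfl|rfl|rfl|rfl|rfl|rfl <;> decide

theorem pv_binChar_tri (c : Char) :
    pvBinChar c = '1' ∨ pvBinChar c = 'P' ∨ pvBinChar c = '0' := by
  unfold pvBinChar; split_ifs <;> simp

theorem pv_binChar_one (c : Char) : pvBinChar c = '1' ↔ c ∈ pvListAA := by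
  unfold pvBinChar; split_ifs with ha hb <;> simp [ha]

theorem pv_binChar_P (c : Char) : pvBinChar c = 'P' ↔ (c = 'P' ∨ c = 'p') := by
  unfold pvBinChar; split_ifs with ha hb
  · simp only [show (('1':Char) = 'P') = False from by decide, false_iff]
    exact pv_aa_not_p ha
  · simp only [List.mem_cons] at hb
    simp only [true_iff]
    tauto
  · simp only [List.mem_cons, not_or] at hb
    simp only [show (('0':Char) = 'P') = False from by decide, false_iff, not_or]
    exact ⟨hb.1, hb.2.1⟩

theorem pv_perm (E : List (Int × Char)) :
    (E.filterMap (fun p => if pvBinChar p.2 = '1' then some p.1 else none) ++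
      E.filterMap (fun p => if pvBinChar p.2 = 'P' then some p.1 else none)).Perm
    (E.filterMap (fun p => if pvBinChar p.2 = '0' then none else some p.1)) := by
  induction E with
  | nil => simp
  | cons p E ih =>
    rcases pv_binChar_tri p.2 with h | h | h <;> simp [h]
    · exact ih
    · exact List.perm_middle.trans (ih.cons p.1)
    · exact ih

theorem pv_filterMap_bool (E : List (Int × Char)) :
    E.filterMap (fun p => if pvBinChar p.2 = '0' then none else some p.1) =
      (E.filter (fun p => !(pvBinChar p.2 == '0'))).map Prod.fst := by
  induction E with
  | nil => rfl
  | cons p E ih =>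
    by_cases h : pvBinChar p.2 = '0' <;> simp [h, ih]

theorem pv_step_eq (posP : List Int) (st : List (List Int) × List Int) (i : Int) (c : Char)
    (hmem : i ∈ posP ↔ pvBinChar c = 'P') :
    (if !(pvBinChar c == '0') then pvHCStep posP st i else st) = pvScanStep st (i, c) := by
  rcases pv_binChar_tri c with h | h | h
  · have hnP : i ∉ posP := by rw [hmem, h]; decide
    have hstrong : c ∈ pvStrong := by
      rw [show pvStrong = pvListAA from by decide]; exact (pv_binChar_one c).mp h
    rw [h]
    simp only [show (!(('1':Char) == '0')) = true from by decide, if_true]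
    unfold pvHCStep pvScanStep
    simp only [hnP, not_false_iff, true_and]
    by_cases hE : st.2 = []
    · simp [hstrong, hE]
    · by_cases hg : i - PySem.List.pyGetD st.2 (-1) 0 < 5
      · simp [hstrong, hE, hg, show ¬ 5 ≤ i - PySem.List.pyGetD st.2 (-1) 0 from by omega]
      · simp [hstrong, hE, hg, show 5 ≤ i - PySem.List.pyGetD st.2 (-1) 0 from by omega]
  · have hP : i ∈ posP := hmem.mpr h
    have hnAA : c ∉ pvListAA := fun hc => by
      rw [(pv_binChar_one c).mpr hc] at h; exact absurd h (by decide)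
    have hstrong : c ∉ pvStrong := by
      rw [show pvStrong = pvListAA from by decide]; exact hnAA
    rw [h]
    simp only [show (!(('P':Char) == '0')) = true from by decide, if_true]
    unfold pvHCStep pvScanStep
    simp [hstrong, hP, (pv_binChar_P c).mp h]
  · have hnAA : c ∉ pvListAA := fun hc => by
      rw [(pv_binChar_one c).mpr hc] at h; exact absurd h (by decide)
    have hstrong : c ∉ pvStrong := by
      rw [show pvStrong = pvListAA from by decide]; exact hnAA
    have hnp : ¬(c = 'P' ∨ c = 'p') := fun hc => by
      rw [(pv_binChar_P c).mpr hc] at h; exact absurd h (by decide)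
    rw [h]
    simp only [show (!(('0':Char) == '0')) = false from by decide, Bool.false_eq_true, if_false]
    unfold pvScanStep
    simp [hstrong, hnp]

theorem pv_fst_inj (core : List Char) {p q : Int × Char}
    (hp : p ∈ PySem.List.enumerate core) (hq : q ∈ PySem.List.enumerate core)
    (h : p.1 = q.1) : p = q := by
  rw [PySem.List.mem_enumerate_iff] at hp hq
  obtain ⟨k, hk, rfl⟩ := hp
  obtain ⟨k', hk', rfl⟩ := hq
  have h' : (k : Int) = (k' : Int) := by simpa using h
  have hk2 : k = k' := by exact_mod_cast h'
  subst hk2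
  rfl

theorem pv_mem_posP (core : List Char) {p : Int × Char}
    (hp : p ∈ PySem.List.enumerate core) :
    (p.1 ∈ (PySem.List.enumerate core).filterMap
        (fun q => if pvBinChar q.2 = 'P' then some q.1 else none) ↔ pvBinChar p.2 = 'P') := by
  constructor
  · intro h
    rw [List.mem_filterMap] at h
    obtain ⟨q, hq, hq2⟩ := h
    by_cases hb : pvBinChar q.2 = 'P'
    · simp [hb] at hq2
      have := pv_fst_inj core hq hp hq2
      rw [← this]; exact hb
    · simp [hb] at hq2
  · intro h
    rw [List.mem_filterMap]
    exact ⟨p, hp, by simp [h]⟩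

theorem pv_pairwise (core : List Char) :
    ((PySem.List.enumerate core).filterMap
        (fun p => if pvBinChar p.2 = '0' then none else some p.1)).Pairwise (· < ·) := by
  rw [pv_filterMap_bool]
  exact ((PySem.List.pairwise_lt_enumerate core 0).filter _).map Prod.fst (fun a b h => h)

theorem pv_findX_map (core : List Char) (x : Char) :
    pvFindX (core.map pvBinChar) x =
      (PySem.List.enumerate core).filterMap
        (fun p => if pvBinChar p.2 = x then some p.1 else none) := by
  unfold pvFindX
  rw [pv_enumerate_map, List.filterMap_map]
  rfl

theorem pv_findHCs_eq_scan (core : List Char) :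
    pvFindHCs (pvBinarization core) =
      (let st := (PySem.List.enumerate core).foldl pvScanStep ([], []);
       if st.2.length > 1 then st.1 ++ [st.2] else st.1) := by
  simp only [pvFindHCs, pvBinarization]
  rw [pv_findX_map, pv_findX_map]
  have hsorted : PySem.List.sorted
      ((PySem.List.enumerate core).filterMap (fun p => if pvBinChar p.2 = '1' then some p.1 else none) ++
       (PySem.List.enumerate core).filterMap (fun p => if pvBinChar p.2 = 'P' then some p.1 else none))
      (fun x => x) false =
      (PySem.List.enumerate core).filterMap (fun p => if pvBinChar p.2 = '0' then none else some p.1) :=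
    by exact PySem.List.sorted_eq_of_perm_of_pairwise_lt _ _ _ (pv_perm _).symm (pv_pairwise core)
  rw [hsorted]
  have hfold : ((PySem.List.enumerate core).filterMap
        (fun p => if pvBinChar p.2 = '0' then none else some p.1)).foldl
        (pvHCStep ((PySem.List.enumerate core).filterMap
          (fun p => if pvBinChar p.2 = 'P' then some p.1 else none))) ([], []) =
      (PySem.List.enumerate core).foldl pvScanStep ([], []) := by
    rw [pv_filterMap_bool, List.foldl_map,
      ← PySem.List.foldl_if_eq_foldl_filter (fun p => !(pvBinChar p.2 == '0'))
        (fun st (p : Int × Char) => pvHCStep _ st p.1)]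
    refine PySem.List.foldl_congr_mem _ _ _ _ ?_
    intro st p hp
    have := pv_step_eq _ st p.1 p.2 (pv_mem_posP core hp)
    simpa using this
  rw [hfold]

theorem pv_flat_len (u v : List Int → Int) (CL : List (List Int)) :
    (CL.flatMap fun cl => [u cl, v cl]).length = 2 * CL.length := by
  induction CL with
  | nil => rfl
  | cons c CL ih => simp [ih]; omega

theorem pv_fd2 (m : Nat) : PySem.Int.floordiv ((m : Int)) 2 = ((m / 2 : Nat) : Int) := by
  exact_mod_cast PySem.Int.floordiv_natCast m 2

theorem pv_makeDict_foldl (u v : List Int → Int) (w : List Int → String) (CL : List (List Int)) :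
    pvMakeDict (CL.flatMap fun cl => [u cl, v cl]) (CL.map w) =
      CL.foldl (fun d cl => d.insert (u cl, v cl) (w cl)) PySem.Dict.empty := by
  induction CL using List.reverseRecOn with
  | nil => rfl
  | append_singleton CL c ih =>
    have hP : (CL.flatMap fun cl => [u cl, v cl]).length = 2 * CL.length := pv_flat_len u v CL
    rw [List.flatMap_append, List.map_append, List.foldl_append]
    simp only [List.flatMap_cons, List.flatMap_nil, List.append_nil, List.map_cons, List.map_nil,
      List.foldl_cons, List.foldl_nil]
    unfold pvMakeDict
    have hlen : PySem.List.len ((CL.flatMap fun cl => [u cl, v cl]) ++ [u c, v c]) =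
        ((2 * CL.length + 2 : Nat) : Int) := by
      simp [PySem.List.len_eq, hP]
    rw [hlen, pv_fd2, show (2 * CL.length + 2) / 2 = CL.length + 1 from by omega]
    rw [show ((CL.length + 1 : Nat) : Int) = ((CL.length : Nat) : Int) + 1 from by push_cast; ring]
    rw [PySem.List.pyRange_one_succ_right (by positivity)]
    rw [List.foldl_append]
    have hcongr : (PySem.List.pyRange 0 ((CL.length : Nat) : Int) 1).foldl
        (fun d i =>
          d.insert (PySem.List.pyGetD ((CL.flatMap fun cl => [u cl, v cl]) ++ [u c, v c]) (i * 2) 0,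
              PySem.List.pyGetD ((CL.flatMap fun cl => [u cl, v cl]) ++ [u c, v c]) (i * 2 + 1) 0)
            (PySem.List.pyGetD (CL.map w ++ [w c]) i ""))
        PySem.Dict.empty =
        (PySem.List.pyRange 0 ((CL.length : Nat) : Int) 1).foldl
        (fun d i =>
          d.insert (PySem.List.pyGetD (CL.flatMap fun cl => [u cl, v cl]) (i * 2) 0,
              PySem.List.pyGetD (CL.flatMap fun cl => [u cl, v cl]) (i * 2 + 1) 0)
            (PySem.List.pyGetD (CL.map w) i ""))
        PySem.Dict.empty := by
      refine PySem.List.foldl_congr_mem _ _ _ _ ?_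
      intro d i hi
      rw [PySem.List.mem_pyRange_one] at hi
      obtain ⟨h0, hn⟩ := hi
      set k := i.toNat with hk
      have hik : i = (k : Int) := by omega
      have hkn : k < CL.length := by omega
      rw [hik, show ((k : Int) * 2) = ((2 * k : Nat) : Int) from by push_cast; ring,
        show ((2 * k : Nat) : Int) + 1 = ((2 * k + 1 : Nat) : Int) from by push_cast; ring]
      simp only [PySem.List.pyGetD_natCast]
      rw [List.getD_append _ _ _ _ (by omega), List.getD_append _ _ _ _ (by omega),
        List.getD_append _ _ _ _ (by simpa using hkn)]
    rw [hcongr]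
    have hpre : (PySem.List.pyRange 0 ((CL.length : Nat) : Int) 1).foldl
        (fun d i =>
          d.insert (PySem.List.pyGetD (CL.flatMap fun cl => [u cl, v cl]) (i * 2) 0,
              PySem.List.pyGetD (CL.flatMap fun cl => [u cl, v cl]) (i * 2 + 1) 0)
            (PySem.List.pyGetD (CL.map w) i ""))
        PySem.Dict.empty = pvMakeDict (CL.flatMap fun cl => [u cl, v cl]) (CL.map w) := by
      unfold pvMakeDict
      rw [PySem.List.len_eq, hP, pv_fd2, show (2 * CL.length) / 2 = CL.length from by omega]
    rw [hpre, ih]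
    simp only [List.foldl_cons, List.foldl_nil]
    rw [show ((CL.length : Nat) : Int) * 2 = ((2 * CL.length : Nat) : Int) from by push_cast; ring]
    rw [show ((2 * CL.length : Nat) : Int) + 1 = ((2 * CL.length + 1 : Nat) : Int) from by push_cast; ring]
    simp only [PySem.List.pyGetD_natCast]
    rw [List.getD_append_right _ _ _ _ (by omega), List.getD_append_right _ _ _ _ (by omega),
      List.getD_append_right _ _ _ _ (by simp)]
    simp [hP]

theorem pv_hc_str (cl : List Int) :
    String.ofList (pvMakeHC cl) =
      String.ofList ((PySem.List.pyRange (PySem.List.pyGetD cl 0 0)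
          (PySem.List.pyGetD cl (-1) 0 + 1) 1).map
        (fun j => if PySem.Set.contains (PySem.Set.ofList cl) j then '1' else '0')) := by
  unfold pvMakeHC
  congr 1
  refine List.map_congr_left ?_
  intro j _
  by_cases h : j ∈ cl
  · rw [if_pos h, if_pos]
    rw [PySem.Set.contains_iff, PySem.Set.mem_ofList]; exact h
  · rw [if_neg h, if_neg]
    rw [PySem.Set.contains_iff, PySem.Set.mem_ofList]; exact h

theorem pv_punct_eq (cs : List Char) :
    (PySem.List.enumerate cs).filterMap (fun p => if p.2 ∈ ['.', '-'] then some p.1 else none) =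
      (PySem.List.enumerate cs).filterMap (fun p => if p.2 = '.' ∨ p.2 = '-' then some p.1 else none) := by
  refine List.filterMap_congr ?_
  intro p _
  simp [List.mem_cons]

-- ===== VERDICT (by name: the statement is the Claim_ definition above) =====
theorem binary_coding_spec : Claim_equal_binary_coding := by
  unfold Claim_equal_binary_coding
  intro seq _hdom
  unfold Spec_binary_coding
  simp only [binary_coding, binary_coding_alt]
  rw [pv_punct_eq, pv_strip, pv_findHCs_eq_scan]
  rw [List.map_flatMap]
  simp only [List.map_cons, List.map_nil]
  rw [pv_makeDict_foldl
        (fun cl => pvPutBack ((PySem.List.enumerate seq.toList).filterMap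
          (fun p => if p.2 = '.' ∨ p.2 = '-' then some p.1 else none)) (PySem.List.pyGetD cl 0 0))
        (fun cl => pvPutBack ((PySem.List.enumerate seq.toList).filterMap
          (fun p => if p.2 = '.' ∨ p.2 = '-' then some p.1 else none)) (PySem.List.pyGetD cl (-1) 0))
        (fun hc => String.ofList (pvMakeHC hc))]
  congr 1
  congr 1
  refine PySem.List.foldl_congr_mem _ _ _ _ ?_
  intro d cl _
  rw [pv_hc_str]
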